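-- pv_equiv track=rewrite | github.com/JohnEnev/collections_solver | src/cli/evaluate.py | simulate_mistakes_best_case
-- ===== SOURCE A (Python) =====
-- from typing import Dict, Any, Iterable, List, Tuple
--
-- def simulate_mistakes_best_case(
--     pred_groups: List[List[str]], gold_groups: List[Dict[str, Any]]
-- ) -> Dict[str, Any]:
--     """
--     Simulate mistakes in a best-case ordering:
--     - We assume you can choose the order of your 4 predicted groups to minimize mistakes.
--     - A 'guess' equals selecting one predicted group.
--     - If the predicted group exactly equals any remaining gold group -> it's correct and removed (no mistake).
--     - Else it's a mistake (+1). The real game ends after 3 mistakes; we track whether solved within 0/1/2/3 mistakes.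
--     Returns:
--       {
--         "mistakes": int (minimum mistakes needed to get all 4 correct; 3+ means you would bust in-game),
--         "solved_within_0": 0/1,
--         "solved_within_1": 0/1,
--         "solved_within_2": 0/1,
--         "solved_within_3": 0/1
--       }
--     """
--     gold_sets = [set(g["members"]) for g in gold_groups]
--     pred_sets = [set(g) for g in pred_groups]
--
--     # put exact matches first (best-case)
--     exact_first = sorted(
--         pred_sets, key=lambda s: any(s == g for g in gold_sets), reverse=True
--     )
--
--     mistakes = 0
--     remaining_gold = gold_sets.copy()
--
--     for s in exact_first:
--         # if already busted, we can stop counting further (but we compute total min mistakes)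
--         if any(s == g for g in remaining_gold):
--             # correct guess, remove that gold group
--             idx = next(i for i, g in enumerate(remaining_gold) if g == s)
--             remaining_gold.pop(idx)
--         else:
--             mistakes += 1
--
--     solved = int(len(remaining_gold) == 0)
--     out = {
--         "mistakes": mistakes,
--         "solved_within_0": int(solved and mistakes <= 0),
--         "solved_within_1": int(solved and mistakes <= 1),
--         "solved_within_2": int(solved and mistakes <= 2),
--         "solved_within_3": int(solved and mistakes <= 3),
--     }
--     return out
-- ===== SOURCE B (Python) =====
-- def simulate_mistakes_best_case(pred_groups, gold_groups):
--     # Frequency tables over canonical keys (sorted tuple of distinct members);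
--     # matched = multiset intersection size, mistakes = remaining predicted groups.
--     gold_c = {}
--     for g in gold_groups:
--         k = tuple(sorted(set(g["members"])))
--         gold_c[k] = gold_c.get(k, 0) + 1
--     pred_c = {}
--     for p in pred_groups:
--         k = tuple(sorted(set(p)))
--         pred_c[k] = pred_c.get(k, 0) + 1
--     matched = sum(min(c, gold_c.get(k, 0)) for k, c in pred_c.items())
--     mistakes = len(pred_groups) - matched
--     solved = int(matched == len(gold_groups))
--     return {
--         "mistakes": mistakes,
--         "solved_within_0": int(solved and mistakes <= 0),
--         "solved_within_1": int(solved and mistakes <= 1),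
--         "solved_within_2": int(solved and mistakes <= 2),
--         "solved_within_3": int(solved and mistakes <= 3),
--     }
-- ===== Notes on version B (the rewrite author's own statement) =====
-- stated objective: alternative
-- what changed: Replaces A's sort-then-greedy-pop scan (pairwise set comparisons against a shrinking remaining_gold list) by two frequency tables keyed by the canonical form of each group (sorted tuple of distinct members), summing the multiset minima to get the matched count.
import Mathlib
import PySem

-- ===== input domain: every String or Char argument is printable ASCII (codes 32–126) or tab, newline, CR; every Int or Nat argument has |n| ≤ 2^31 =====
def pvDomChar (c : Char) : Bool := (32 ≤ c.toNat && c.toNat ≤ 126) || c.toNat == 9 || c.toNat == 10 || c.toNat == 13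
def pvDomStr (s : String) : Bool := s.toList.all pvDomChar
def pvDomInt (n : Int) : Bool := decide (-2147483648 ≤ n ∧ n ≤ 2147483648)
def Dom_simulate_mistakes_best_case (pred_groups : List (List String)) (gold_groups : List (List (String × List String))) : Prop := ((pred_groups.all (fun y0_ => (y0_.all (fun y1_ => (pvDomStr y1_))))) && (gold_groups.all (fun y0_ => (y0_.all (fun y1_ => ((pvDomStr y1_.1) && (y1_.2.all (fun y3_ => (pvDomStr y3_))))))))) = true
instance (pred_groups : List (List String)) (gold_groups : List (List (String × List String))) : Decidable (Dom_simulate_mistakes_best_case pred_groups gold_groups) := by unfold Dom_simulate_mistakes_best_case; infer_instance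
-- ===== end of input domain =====

-- B replaces A's sort-then-greedy-pop scan by counting canonical keys (sorted distinct members)
-- in two frequency tables and summing the multiset minima; equivalence of the RETURN values is proved.

-- ===== PORT A =====
-- idx = next(i for i, g in enumerate(remaining_gold) if g == s)  (guarded by `any`, so a match exists)
def pvFindEqIdx (remaining : List (PySem.Set String)) (s : PySem.Set String) : Nat :=
  remaining.findIdx (fun g => PySem.Set.equal g s)

def simulate_mistakes_best_case (pred_groups : List (List String)) (gold_groups : List (List (String × List String))) : List (String × Int) :=
  let gold_sets : List (PySem.Set String) :=
    gold_groups.map (fun g => PySem.Set.ofList (((PySem.Dict.mk g).get? "members").getD []))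
  let pred_sets : List (PySem.Set String) := pred_groups.map (fun g => PySem.Set.ofList g)
  let exact_first := PySem.List.sorted pred_sets (fun s => gold_sets.any (fun g => PySem.Set.equal s g)) true
  -- for s in exact_first: match → pop first equal gold; else mistakes += 1
  let st := exact_first.foldl (fun (st : Int × List (PySem.Set String)) s =>
      if st.2.any (fun g => PySem.Set.equal s g) then
        (st.1, st.2.eraseIdx (pvFindEqIdx st.2 s))
      else (st.1 + 1, st.2)) ((0 : Int), gold_sets)
  let mistakes := st.1
  let solved : Int := if st.2.length = 0 then 1 else 0
  [("mistakes", mistakes),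
   ("solved_within_0", if solved = 1 ∧ mistakes ≤ 0 then (1 : Int) else 0),
   ("solved_within_1", if solved = 1 ∧ mistakes ≤ 1 then (1 : Int) else 0),
   ("solved_within_2", if solved = 1 ∧ mistakes ≤ 2 then (1 : Int) else 0),
   ("solved_within_3", if solved = 1 ∧ mistakes ≤ 3 then (1 : Int) else 0)]

-- ===== PORT B =====
-- k = tuple(sorted(set(xs)))
def pvCanonKey (xs : List String) : List String :=
  PySem.List.sorted (PySem.Set.ofList xs) (fun x => x) false

def simulate_mistakes_best_case_alt (pred_groups : List (List String)) (gold_groups : List (List (String × List String))) : List (String × Int) :=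
  let gold_c : PySem.Dict (List String) Int :=
    gold_groups.foldl (fun d g =>
      let k := pvCanonKey (((PySem.Dict.mk g).get? "members").getD [])
      d.insert k (d.getD k 0 + 1)) PySem.Dict.empty
  let pred_c : PySem.Dict (List String) Int :=
    pred_groups.foldl (fun d p =>
      let k := pvCanonKey p
      d.insert k (d.getD k 0 + 1)) PySem.Dict.empty
  let matched : Int := pred_c.items.foldl (fun acc kv => acc + min kv.2 (gold_c.getD kv.1 0)) 0
  let mistakes : Int := (pred_groups.length : Int) - matched
  let solved : Int := if matched = (gold_groups.length : Int) then 1 else 0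
  [("mistakes", mistakes),
   ("solved_within_0", if solved = 1 ∧ mistakes ≤ 0 then (1 : Int) else 0),
   ("solved_within_1", if solved = 1 ∧ mistakes ≤ 1 then (1 : Int) else 0),
   ("solved_within_2", if solved = 1 ∧ mistakes ≤ 2 then (1 : Int) else 0),
   ("solved_within_3", if solved = 1 ∧ mistakes ≤ 3 then (1 : Int) else 0)]

-- ===== PRECONDITION & SPEC =====
-- Pre_ excludes exactly the inputs where g["members"] raises KeyError (a gold group without a "members" key).
def Pre_simulate_mistakes_best_case (pred_groups : List (List String)) (gold_groups : List (List (String × List String))) : Prop :=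
  ∀ g ∈ gold_groups, ((PySem.Dict.mk g).get? "members").isSome

instance (pred_groups : List (List String)) (gold_groups : List (List (String × List String))) : Decidable (Pre_simulate_mistakes_best_case pred_groups gold_groups) := by unfold Pre_simulate_mistakes_best_case; infer_instance

def pvWitness_simulate_mistakes_best_case : List (List String) × (List (List (String × List String))) :=
  ([["a", "b"], ["c"]], [[("members", ["b", "a"])], [("members", ["c"]), ("x", [])]])

def Spec_simulate_mistakes_best_case (pred_groups : List (List String)) (gold_groups : List (List (String × List String))) (out : List (String × Int)) : Prop := out = simulate_mistakes_best_case_alt pred_groups gold_groups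
instance (pred_groups : List (List String)) (gold_groups : List (List (String × List String))) (out : List (String × Int)) : Decidable (Spec_simulate_mistakes_best_case pred_groups gold_groups out) := by unfold Spec_simulate_mistakes_best_case; infer_instance

-- ===== CLAIM (what is proved, stated in full; the proofs are below) =====
def Claim_equal_simulate_mistakes_best_case : Prop := ∀ (pred_groups : List (List String)) (gold_groups : List (List (String × List String))), Dom_simulate_mistakes_best_case pred_groups gold_groups → Pre_simulate_mistakes_best_case pred_groups gold_groups → Spec_simulate_mistakes_best_case pred_groups gold_groups (simulate_mistakes_best_case pred_groups gold_groups)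

-- ===== LEMMAS AND PROOFS =====

-- canonical key of a (nodup) set: its sorted element list
def pvK (s : PySem.Set String) : List String := PySem.List.sorted s (fun x => x) false

-- greedy matched count: one match removed from R per element of P that still has an equal partner
def pvMc : List (List String) → List (List String) → Nat
  | [], _ => 0
  | x :: P, R => if x ∈ R then pvMc P (R.erase x) + 1 else pvMc P R

theorem pvK_eq_iff (s t : PySem.Set String) (hs : s.Nodup) (ht : t.Nodup) :
    PySem.Set.equal s t = true ↔ pvK s = pvK t := by
  rw [PySem.Set.equal_iff, pvK, pvK, PySem.List.sorted_id_eq_sorted_id_iff_perm,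
    List.perm_ext_iff_of_nodup hs ht]

theorem pvMc_le_right (P R : List (List String)) : pvMc P R ≤ R.length := by
  induction P generalizing R with
  | nil => simp [pvMc]
  | cons x P ih =>
    simp only [pvMc]
    split
    · have h1 : (R.erase x).length = R.length - 1 := List.length_erase_of_mem (by assumption)
      have h2 := ih (R.erase x)
      have : 0 < R.length := List.length_pos_of_mem (by assumption)
      omega
    · exact ih R

-- greedy matched count = Σ over any superset K of P's values of min(count in P, count in R)
theorem pvMc_eq_sum (P R K : List (List String)) (hK : K.Nodup) (hsub : ∀ x ∈ P, x ∈ K) :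
    (pvMc P R : Int) = (K.map (fun k => min ((P.count k : Int)) ((R.count k : Int)))).sum := by
  induction P generalizing R with
  | nil =>
    simp only [pvMc, List.count_nil]
    rw [List.sum_eq_zero]
    · simp
    · intro x hx
      simp only [List.mem_map] at hx
      obtain ⟨k, _, rfl⟩ := hx
      simp
  | cons x P ih =>
    have hsub' : ∀ y ∈ P, y ∈ K := fun y hy => hsub y (List.mem_cons_of_mem _ hy)
    by_cases hxR : x ∈ R
    · have hstep : ∀ k ∈ K,
          min (((x :: P).count k : Int)) ((R.count k : Int))
            = min ((P.count k : Int)) (((R.erase x).count k : Int)) + (if k = x then 1 else 0) := by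
        intro k _
        by_cases hkx : k = x
        · subst hkx
          have hpos : 0 < R.count k := List.count_pos_iff.mpr hxR
          have he : (R.erase k).count k = R.count k - 1 := List.count_erase_self
          rw [List.count_cons_self, he, if_pos rfl]
          have : ((R.count k : Int)) = ((R.count k - 1 : Nat) : Int) + 1 := by omega
          rw [this]
          push_cast
          exact min_add_add_right _ _ _
        · have hc : List.count k (x :: P) = List.count k P := by
            rw [List.count_cons]; simp [Ne.symm hkx]
          rw [hc, List.count_erase_of_ne hkx, if_neg hkx, add_zero]
      rw [List.map_congr_left hstep, PySem.List.sum_map_add_int]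
      have hone : (K.map (fun k => if k = x then (1 : Int) else 0)).sum = 1 := by
        have : (K.map (fun k => if (k == x) = true then (1 : Int) else 0)).sum
            = ((K.countP (fun k => k == x) : Nat) : Int) := PySem.List.sum_map_ite_one_zero _ _
        simp only [beq_iff_eq] at this
        rw [this]
        have : K.countP (fun k => k == x) = K.count x := rfl
        rw [this, List.count_eq_one_of_mem hK (hsub x (List.mem_cons_self))]
        simp
      rw [hone, ← ih (R.erase x) hsub']
      simp only [pvMc, if_pos hxR]
      push_cast
      ring
    · have hstep : ∀ k ∈ K,
          min (((x :: P).count k : Int)) ((R.count k : Int))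
            = min ((P.count k : Int)) ((R.count k : Int)) := by
        intro k _
        by_cases hkx : k = x
        · subst hkx
          have h0 : R.count k = 0 := by
            rw [List.count_eq_zero]; exact hxR
          rw [h0, List.count_cons_self]
          push_cast
          rw [min_eq_right (by positivity), min_eq_right (by positivity)]
        · have hc : List.count k (x :: P) = List.count k P := by
            rw [List.count_cons]; simp [Ne.symm hkx]
          rw [hc]
      rw [List.map_congr_left hstep, ← ih R hsub']
      simp [pvMc, hxR]

-- A's pop-at-first-equal-index, seen through the canonical keys, is List.erase
theorem pvErase_map (R : List (List String)) (s : List String)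
    (hR : ∀ g ∈ R, List.Nodup g) (hs : s.Nodup) (hmem : pvK s ∈ R.map pvK) :
    (R.eraseIdx (pvFindEqIdx R s)).map pvK = (R.map pvK).erase (pvK s) := by
  induction R with
  | nil => simp
  | cons g R ih =>
    have hg : g.Nodup := hR g (List.mem_cons_self)
    have hR' : ∀ g' ∈ R, List.Nodup g' := fun g' h => hR g' (List.mem_cons_of_mem _ h)
    by_cases heq : pvK g = pvK s
    · have hb : PySem.Set.equal g s = true := (pvK_eq_iff g s hg hs).mpr heq
      simp [pvFindEqIdx, List.findIdx_cons, hb, heq]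
    · have hb : PySem.Set.equal g s = false := by
        by_contra h
        exact heq ((pvK_eq_iff g s hg hs).mp (by simpa using h))
      have hmem' : pvK s ∈ R.map pvK := by
        rcases List.mem_cons.mp hmem with h | h
        · exact absurd h.symm heq
        · exact h
      have hne : ¬ (pvK g == pvK s) = true := by simpa using fun h => heq h
      simp only [pvFindEqIdx, List.findIdx_cons, hb, cond_false, List.eraseIdx_cons_succ,
        List.map_cons, List.erase_cons]
      rw [← pvFindEqIdx, ih hR' hmem']
      simp [hne]

-- the `any` test seen through the canonical keys is membership
theorem pvAny_iff (R : List (List String)) (s : List String)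
    (hR : ∀ g ∈ R, List.Nodup g) (hs : s.Nodup) :
    R.any (fun g => PySem.Set.equal s g) = true ↔ pvK s ∈ R.map pvK := by
  simp only [List.any_eq_true, List.mem_map]
  constructor
  · rintro ⟨g, hg, hb⟩
    exact ⟨g, hg, ((pvK_eq_iff s g hs (hR g hg)).mp hb).symm⟩
  · rintro ⟨g, hg, hk⟩
    exact ⟨g, hg, (pvK_eq_iff s g hs (hR g hg)).mpr hk.symm⟩

-- A's loop computes: mistakes = m + |S| - mc, |remaining| = |R| - mc  (through canonical keys)
theorem pvFoldA (S R : List (List String)) (m : Int)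
    (hS : ∀ s ∈ S, List.Nodup s) (hR : ∀ g ∈ R, List.Nodup g) :
    (S.foldl (fun (st : Int × List (PySem.Set String)) s =>
        if st.2.any (fun g => PySem.Set.equal s g) then
          (st.1, st.2.eraseIdx (pvFindEqIdx st.2 s))
        else (st.1 + 1, st.2)) (m, R)).1
      = m + (S.length : Int) - (pvMc (S.map pvK) (R.map pvK) : Int)
    ∧ ((S.foldl (fun (st : Int × List (PySem.Set String)) s =>
        if st.2.any (fun g => PySem.Set.equal s g) then
          (st.1, st.2.eraseIdx (pvFindEqIdx st.2 s))
        else (st.1 + 1, st.2)) (m, R)).2).length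
      = R.length - pvMc (S.map pvK) (R.map pvK) := by
  induction S generalizing R m with
  | nil => simp [pvMc]
  | cons s S ih =>
    have hs : s.Nodup := hS s (List.mem_cons_self)
    have hS' : ∀ x ∈ S, List.Nodup x := fun x h => hS x (List.mem_cons_of_mem _ h)
    by_cases hany : R.any (fun g => PySem.Set.equal s g) = true
    · have hmem : pvK s ∈ R.map pvK := (pvAny_iff R s hR hs).mp hany
      have herase := pvErase_map R s hR hs hmem
      have hR' : ∀ g ∈ R.eraseIdx (pvFindEqIdx R s), List.Nodup g := fun g h =>
        hR g ((List.eraseIdx_sublist R (pvFindEqIdx R s)).mem h)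
      have hlen : (R.eraseIdx (pvFindEqIdx R s)).length = R.length - 1 := by
        have := congrArg List.length herase
        simpa [List.length_erase_of_mem hmem] using this
      have := ih (R.eraseIdx (pvFindEqIdx R s)) m hS' hR'
      rw [herase] at this
      simp only [List.foldl_cons, if_pos hany]
      constructor
      · rw [this.1]
        simp only [List.map_cons, pvMc, if_pos hmem, List.length_cons]
        push_cast
        ring
      · rw [this.2, hlen]
        simp only [List.map_cons, pvMc, if_pos hmem]
        omega
    · have hmem : pvK s ∉ R.map pvK := fun h => hany ((pvAny_iff R s hR hs).mpr h)
      have := ih R (m + 1) hS' hR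
      simp only [List.foldl_cons, if_neg hany]
      constructor
      · rw [this.1]
        simp only [List.map_cons, pvMc, if_neg hmem, List.length_cons]
        push_cast
        ring
      · rw [this.2]
        simp only [List.map_cons, pvMc, if_neg hmem]

-- common canonical-key lists and the common output value both ports are reduced to
def pvGk (gold_groups : List (List (String × List String))) : List (List String) :=
  gold_groups.map (fun g => pvCanonKey (((PySem.Dict.mk g).get? "members").getD []))

def pvPk (pred_groups : List (List String)) : List (List String) :=
  pred_groups.map (fun p => pvCanonKey p)

def pvOut (pred_groups : List (List String)) (gold_groups : List (List (String × List String))) : List (String × Int) :=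
  let matched : Int := ((PySem.Set.ofList (pvPk pred_groups)).map
    (fun k => min (((pvPk pred_groups).count k : Int)) (((pvGk gold_groups).count k : Int)))).sum
  let mistakes : Int := (pred_groups.length : Int) - matched
  let solved : Int := if matched = (gold_groups.length : Int) then 1 else 0
  [("mistakes", mistakes),
   ("solved_within_0", if solved = 1 ∧ mistakes ≤ 0 then (1 : Int) else 0),
   ("solved_within_1", if solved = 1 ∧ mistakes ≤ 1 then (1 : Int) else 0),
   ("solved_within_2", if solved = 1 ∧ mistakes ≤ 2 then (1 : Int) else 0),
   ("solved_within_3", if solved = 1 ∧ mistakes ≤ 3 then (1 : Int) else 0)]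

theorem pvB_eq (pred_groups : List (List String)) (gold_groups : List (List (String × List String))) :
    simulate_mistakes_best_case_alt pred_groups gold_groups = pvOut pred_groups gold_groups := by
  simp only [simulate_mistakes_best_case_alt, pvOut]
  have hG : gold_groups.foldl (fun d g =>
        d.insert (pvCanonKey (((PySem.Dict.mk g).get? "members").getD []))
          (d.getD (pvCanonKey (((PySem.Dict.mk g).get? "members").getD [])) 0 + 1)) PySem.Dict.empty
      = PySem.Dict.counter (pvGk gold_groups) := by
    rw [← PySem.Dict.foldl_insert_getD_add_one_eq_counter, pvGk]
    exact (List.foldl_map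
      (f := fun g => pvCanonKey (((PySem.Dict.mk g).get? "members").getD []))
      (g := fun (d : PySem.Dict (List String) Int) (k : List String) => d.insert k (d.getD k 0 + 1))).symm
  have hP : pred_groups.foldl (fun d p =>
        d.insert (pvCanonKey p) (d.getD (pvCanonKey p) 0 + 1)) PySem.Dict.empty
      = PySem.Dict.counter (pvPk pred_groups) := by
    rw [← PySem.Dict.foldl_insert_getD_add_one_eq_counter, pvPk]
    exact (List.foldl_map
      (f := fun p => pvCanonKey p)
      (g := fun (d : PySem.Dict (List String) Int) (k : List String) => d.insert k (d.getD k 0 + 1))).symm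
  rw [hG, hP]
  rw [PySem.List.foldl_add ((PySem.Dict.counter (pvPk pred_groups)).items)
    (fun kv => min kv.2 ((PySem.Dict.counter (pvGk gold_groups)).getD kv.1 0)) 0]
  rw [PySem.Dict.items_counter]
  simp only [List.map_map, Function.comp_def, PySem.Dict.getD_counter, zero_add]

theorem pvA_eq (pred_groups : List (List String)) (gold_groups : List (List (String × List String))) :
    simulate_mistakes_best_case pred_groups gold_groups = pvOut pred_groups gold_groups := by
  simp only [simulate_mistakes_best_case, pvOut]
  have hSnodup : ∀ s ∈ PySem.List.sorted (pred_groups.map (fun g => PySem.Set.ofList g))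
      (fun s => (gold_groups.map (fun g => PySem.Set.ofList (((PySem.Dict.mk g).get? "members").getD []))).any
        (fun g => PySem.Set.equal s g)) true, List.Nodup s := by
    intro s hs
    rw [PySem.List.mem_sorted] at hs
    obtain ⟨g, _, rfl⟩ := List.mem_map.mp hs
    exact PySem.Set.nodup_ofList g
  have hRnodup : ∀ t ∈ gold_groups.map (fun g => PySem.Set.ofList (((PySem.Dict.mk g).get? "members").getD [])),
      List.Nodup t := by
    intro t ht
    obtain ⟨g, _, rfl⟩ := List.mem_map.mp ht
    exact PySem.Set.nodup_ofList _
  have hA := pvFoldA _ _ 0 hSnodup hRnodup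
  rw [hA.1, hA.2]
  have hGk : (gold_groups.map (fun g => PySem.Set.ofList (((PySem.Dict.mk g).get? "members").getD []))).map pvK
      = pvGk gold_groups := by
    rw [List.map_map]; rfl
  have hperm : ((PySem.List.sorted (pred_groups.map (fun g => PySem.Set.ofList g))
      (fun s => (gold_groups.map (fun g => PySem.Set.ofList (((PySem.Dict.mk g).get? "members").getD []))).any
        (fun g => PySem.Set.equal s g)) true).map pvK).Perm (pvPk pred_groups) := by
    have h1 := (PySem.List.sorted_perm (pred_groups.map (fun g => PySem.Set.ofList g))
      (fun s => (gold_groups.map (fun g => PySem.Set.ofList (((PySem.Dict.mk g).get? "members").getD []))).any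
        (fun g => PySem.Set.equal s g)) true).map pvK
    have h2 : (pred_groups.map (fun g => PySem.Set.ofList g)).map pvK = pvPk pred_groups := by
      rw [List.map_map]; rfl
    rw [h2] at h1
    exact h1
  have hmc : ((pvMc ((PySem.List.sorted (pred_groups.map (fun g => PySem.Set.ofList g))
      (fun s => (gold_groups.map (fun g => PySem.Set.ofList (((PySem.Dict.mk g).get? "members").getD []))).any
        (fun g => PySem.Set.equal s g)) true).map pvK)
      ((gold_groups.map (fun g => PySem.Set.ofList (((PySem.Dict.mk g).get? "members").getD []))).map pvK) : Nat) : Int)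
      = ((PySem.Set.ofList (pvPk pred_groups)).map
          (fun k => min (((pvPk pred_groups).count k : Int)) (((pvGk gold_groups).count k : Int)))).sum := by
    rw [pvMc_eq_sum _ _ (PySem.Set.ofList (pvPk pred_groups)) (PySem.Set.nodup_ofList _)
      (fun x hx => (PySem.Set.mem_ofList _ _).mpr (hperm.mem_iff.mp hx))]
    rw [hGk]
    exact congrArg List.sum (List.map_congr_left (fun k _ => by rw [hperm.count_eq]))
  have hlenS : (PySem.List.sorted (pred_groups.map (fun g => PySem.Set.ofList g))
      (fun s => (gold_groups.map (fun g => PySem.Set.ofList (((PySem.Dict.mk g).get? "members").getD []))).any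
        (fun g => PySem.Set.equal s g)) true).length = pred_groups.length := by
    rw [PySem.List.length_sorted, List.length_map]
  have hle := pvMc_le_right ((PySem.List.sorted (pred_groups.map (fun g => PySem.Set.ofList g))
      (fun s => (gold_groups.map (fun g => PySem.Set.ofList (((PySem.Dict.mk g).get? "members").getD []))).any
        (fun g => PySem.Set.equal s g)) true).map pvK)
      ((gold_groups.map (fun g => PySem.Set.ofList (((PySem.Dict.mk g).get? "members").getD []))).map pvK)
  have hle' : pvMc ((PySem.List.sorted (pred_groups.map (fun g => PySem.Set.ofList g))
      (fun s => (gold_groups.map (fun g => PySem.Set.ofList (((PySem.Dict.mk g).get? "members").getD []))).any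
        (fun g => PySem.Set.equal s g)) true).map pvK)
      ((gold_groups.map (fun g => PySem.Set.ofList (((PySem.Dict.mk g).get? "members").getD []))).map pvK)
      ≤ gold_groups.length := by
    simpa using hle
  have hcond : ((gold_groups.map (fun g => PySem.Set.ofList (((PySem.Dict.mk g).get? "members").getD []))).length
        - pvMc ((PySem.List.sorted (pred_groups.map (fun g => PySem.Set.ofList g))
          (fun s => (gold_groups.map (fun g => PySem.Set.ofList (((PySem.Dict.mk g).get? "members").getD []))).any
            (fun g => PySem.Set.equal s g)) true).map pvK)
          ((gold_groups.map (fun g => PySem.Set.ofList (((PySem.Dict.mk g).get? "members").getD []))).map pvK) = 0)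
      ↔ (((PySem.Set.ofList (pvPk pred_groups)).map
          (fun k => min (((pvPk pred_groups).count k : Int)) (((pvGk gold_groups).count k : Int)))).sum
          = (gold_groups.length : Int)) := by
    rw [← hmc, List.length_map]
    omega
  have hsolved := if_congr hcond (rfl : (1 : Int) = 1) (rfl : (0 : Int) = 0)
  rw [hsolved, hmc, hlenS]
  ring_nf

-- ===== VERDICT (by name: the statement is the Claim_ definition above) =====
theorem simulate_mistakes_best_case_spec : Claim_equal_simulate_mistakes_best_case := by
  intro pred_groups gold_groups _ _
  unfold Spec_simulate_mistakes_best_case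
  rw [pvA_eq, pvB_eq]
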